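-- pv_equiv track=rewrite | github.com/uroborus2s/sinan-captcha | packages/sinan-captcha/src/materials/query_audit_cli.py | _defaulted_path_options
-- ===== SOURCE A (Python) =====
-- def _defaulted_path_options(raw_argv: list[str]) -> list[str]:
--     explicit_options = {
--         token.split("=", 1)[0]
--         for token in raw_argv
--         if token.startswith("--")
--     }
--     path_options = ["--query-dir", "--output-root", "--report-root", "--cache-dir"]
--     return [option for option in path_options if option not in explicit_options]
-- ===== SOURCE B (Python) =====
-- def _defaulted_path_options(raw_argv: list[str]) -> list[str]:
--     remaining = ["--query-dir", "--output-root", "--report-root", "--cache-dir"]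
--     for tok in raw_argv:
--         if tok.startswith("--"):
--             head = tok.split("=", 1)[0]
--             if head in remaining:
--                 remaining.remove(head)
--     return remaining
-- ===== Notes on version B (the rewrite author's own statement) =====
-- stated objective: alternative
-- what changed: B inverts the traversal: instead of collecting explicit '--' option names into a set and then filtering the default list, it makes a single pass over raw_argv, removing each seen option name from a shrinking accumulator list of defaults and returning what remains.
import Mathlib
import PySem

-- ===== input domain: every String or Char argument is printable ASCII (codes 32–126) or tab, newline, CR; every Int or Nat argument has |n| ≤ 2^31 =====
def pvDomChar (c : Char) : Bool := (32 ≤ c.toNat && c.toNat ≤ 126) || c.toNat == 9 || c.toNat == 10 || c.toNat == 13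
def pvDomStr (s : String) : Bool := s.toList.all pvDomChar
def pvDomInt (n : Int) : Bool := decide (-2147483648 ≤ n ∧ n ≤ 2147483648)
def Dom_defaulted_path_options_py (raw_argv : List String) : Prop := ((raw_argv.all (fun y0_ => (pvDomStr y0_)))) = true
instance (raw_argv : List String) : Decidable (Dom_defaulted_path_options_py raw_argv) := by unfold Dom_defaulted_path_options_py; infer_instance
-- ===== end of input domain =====

-- B inverts the traversal: one pass over raw_argv removing each seen '--' option name from a shrinking list of defaults (alternative decomposition, same cost class).

-- token.split("=", 1)[0] (split with sep "=" never returns none or an empty list, so [0] never raises)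
def pvSplitHead (t : String) : String :=
  match PySem.Str.splitMax? t "=" 1 with
  | some (p :: _) => p
  | _ => ""

-- ===== PORT A =====
def defaulted_path_options_py (raw_argv : List String) : List String :=
  let explicit_options : PySem.Set String :=
    PySem.Set.ofList ((raw_argv.filter (fun t => PySem.Str.startswith t "--")).map pvSplitHead)
  let path_options := ["--query-dir", "--output-root", "--report-root", "--cache-dir"]
  path_options.filter (fun o => !(PySem.Set.contains explicit_options o))

-- ===== PORT B =====
def pvStepB (rem : List String) (tok : String) : List String :=
  if PySem.Str.startswith tok "--" then
    let head := pvSplitHead tok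
    if head ∈ rem then (PySem.List.remove? rem head).getD rem else rem
  else rem

def defaulted_path_options_py_alt (raw_argv : List String) : List String :=
  raw_argv.foldl pvStepB ["--query-dir", "--output-root", "--report-root", "--cache-dir"]

-- ===== PRECONDITION & SPEC =====
def Spec_defaulted_path_options_py (raw_argv : List String) (out : List String) : Prop := out = defaulted_path_options_py_alt raw_argv
instance (raw_argv : List String) (out : List String) : Decidable (Spec_defaulted_path_options_py raw_argv out) := by unfold Spec_defaulted_path_options_py; infer_instance

-- ===== CLAIM (what is proved, stated in full; the proofs are below) =====
def Claim_equal_defaulted_path_options_py : Prop := ∀ (raw_argv : List String), Dom_defaulted_path_options_py raw_argv → Spec_defaulted_path_options_py raw_argv (defaulted_path_options_py raw_argv)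

-- ===== LEMMAS AND PROOFS =====

-- membership in A's set of explicit options, rephrased as an argv scan
theorem pv_mem_explicit_iff (raw_argv : List String) (o : String) :
    PySem.Set.contains
      (PySem.Set.ofList ((raw_argv.filter (fun t => PySem.Str.startswith t "--")).map pvSplitHead)) o
      = raw_argv.any (fun t => PySem.Str.startswith t "--" && pvSplitHead t == o) := by
  rw [Bool.eq_iff_iff, PySem.Set.contains_iff, PySem.Set.mem_ofList, List.any_eq_true]
  simp only [List.mem_map, List.mem_filter, Bool.and_eq_true, beq_iff_eq]
  constructor
  · rintro ⟨t, ⟨ht, hs⟩, rfl⟩; exact ⟨t, ht, hs, rfl⟩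
  · rintro ⟨t, ht, hs, rfl⟩; exact ⟨t, ⟨ht, hs⟩, rfl⟩

-- one step of B on a duplicate-free accumulator is a filter
theorem pv_step_eq_filter (rem : List String) (t : String) (hnd : rem.Nodup) :
    pvStepB rem t = rem.filter (fun o => !(PySem.Str.startswith t "--" && pvSplitHead t == o)) := by
  unfold pvStepB
  by_cases hs : PySem.Str.startswith t "--"
  · rw [if_pos hs]
    by_cases hm : pvSplitHead t ∈ rem
    · rw [if_pos hm, PySem.List.remove?_eq_some_erase rem (pvSplitHead t) hm, Option.getD_some,
        hnd.erase_eq_filter]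
      apply List.filter_congr
      intro o _
      have hs' : PySem.Chars.startswith t.toList ['-', '-'] = true := by
        simpa using hs
      simp [hs', BEq.comm, bne]
    · rw [if_neg hm, Eq.comm, List.filter_eq_self]
      intro o ho
      simp only [hs, Bool.true_and, Bool.not_eq_eq_eq_not, Bool.not_true, beq_eq_false_iff_ne,
        ne_eq]
      rintro rfl; exact hm ho
  · rw [if_neg hs, Eq.comm, List.filter_eq_self]
    intro o _
    simp [Bool.not_eq_true] at hs
    simp [hs]

theorem pv_fold_eq_filter (ts : List String) (rem : List String) (hnd : rem.Nodup) :
    ts.foldl pvStepB rem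
      = rem.filter (fun o => !(ts.any (fun t => PySem.Str.startswith t "--" && pvSplitHead t == o))) := by
  induction ts generalizing rem with
  | nil => simp
  | cons t ts ih =>
    rw [List.foldl_cons, pv_step_eq_filter _ _ hnd,
      ih _ (hnd.filter _), List.filter_filter]
    apply List.filter_congr
    intro o _
    simp only [List.any_cons, Bool.not_or, Bool.and_comm]

-- ===== VERDICT (by name: the statement is the Claim_ definition above) =====
theorem defaulted_path_options_py_spec : Claim_equal_defaulted_path_options_py := by
  intro raw_argv _
  unfold Spec_defaulted_path_options_py defaulted_path_options_py defaulted_path_options_py_alt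
  rw [pv_fold_eq_filter _ _ (by decide)]
  apply List.filter_congr
  intro o _
  rw [pv_mem_explicit_iff]
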